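-- pv_equiv track=rewrite | github.com/birdhui/Python | 7장/exam_0702.py | divide3
-- ===== SOURCE A (Python) =====
-- def divide3(nlist):
--     n0 =[]
--     n1 =[]
--     n2 =[]
--
--     for i in nlist:
--         if i % 3 == 0:
--             n0.append(i)
--         elif i % 3 == 1:
--             n1.append(i)
--         else:
--             n2.append(i)
--     return n0, n1, n2
-- ===== SOURCE B (Python) =====
-- def divide3(nlist):
--     n0 = [i for i in nlist if i % 3 == 0]
--     n1 = [i for i in nlist if i % 3 == 1]
--     n2 = [i for i in nlist if i % 3 != 0 and i % 3 != 1]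
--     return n0, n1, n2
-- ===== Notes on version B (the rewrite author's own statement) =====
-- stated objective: idiomatic
-- what changed: Replaces the single branching pass with three accumulator lists by three independent filtering comprehensions over nlist, one per residue bucket.
import Mathlib
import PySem

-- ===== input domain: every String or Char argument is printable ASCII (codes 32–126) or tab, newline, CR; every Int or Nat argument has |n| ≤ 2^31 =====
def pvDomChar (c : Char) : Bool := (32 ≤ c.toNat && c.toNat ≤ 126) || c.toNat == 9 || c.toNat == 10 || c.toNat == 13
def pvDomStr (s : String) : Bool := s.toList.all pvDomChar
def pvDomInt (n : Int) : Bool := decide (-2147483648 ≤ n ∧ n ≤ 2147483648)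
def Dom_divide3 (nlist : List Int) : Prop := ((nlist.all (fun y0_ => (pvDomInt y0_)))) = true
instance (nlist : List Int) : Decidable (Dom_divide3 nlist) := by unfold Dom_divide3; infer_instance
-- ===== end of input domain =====

-- B replaces A's single branching pass by three independent filtering scans (idiomatic decomposition; same asymptotic cost).

-- ===== PORT A =====
-- single pass: fold over nlist carrying the three accumulator lists, appending per branch
def divide3 (nlist : List Int) : List Int × List Int × List Int :=
  nlist.foldl
    (fun (st : List Int × List Int × List Int) i =>
      if PySem.Int.mod i 3 = 0 then (st.1 ++ [i], st.2.1, st.2.2)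
      else if PySem.Int.mod i 3 = 1 then (st.1, st.2.1 ++ [i], st.2.2)
      else (st.1, st.2.1, st.2.2 ++ [i]))
    ([], [], [])

-- ===== PORT B =====
-- three independent filters, one per residue bucket
def divide3_alt (nlist : List Int) : List Int × List Int × List Int :=
  (nlist.filter (fun i => PySem.Int.mod i 3 == 0),
   nlist.filter (fun i => PySem.Int.mod i 3 == 1),
   nlist.filter (fun i => PySem.Int.mod i 3 != 0 && PySem.Int.mod i 3 != 1))

-- ===== PRECONDITION & SPEC =====
def Spec_divide3 (nlist : List Int) (out : List Int × List Int × List Int) : Prop := out = divide3_alt nlist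
instance (nlist : List Int) (out : List Int × List Int × List Int) : Decidable (Spec_divide3 nlist out) := by unfold Spec_divide3; infer_instance

-- ===== CLAIM (what is proved, stated in full; the proofs are below) =====
def Claim_equal_divide3 : Prop := ∀ (nlist : List Int), Dom_divide3 nlist → Spec_divide3 nlist (divide3 nlist)

-- ===== LEMMAS AND PROOFS =====
-- loop invariant: folding from any accumulator state appends the three filtered lists
theorem divide3_foldl_inv (nlist : List Int) (a b c : List Int) :
    nlist.foldl
      (fun (st : List Int × List Int × List Int) i =>
        if PySem.Int.mod i 3 = 0 then (st.1 ++ [i], st.2.1, st.2.2)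
        else if PySem.Int.mod i 3 = 1 then (st.1, st.2.1 ++ [i], st.2.2)
        else (st.1, st.2.1, st.2.2 ++ [i]))
      (a, b, c)
    = (a ++ nlist.filter (fun i => PySem.Int.mod i 3 == 0),
       b ++ nlist.filter (fun i => PySem.Int.mod i 3 == 1),
       c ++ nlist.filter (fun i => PySem.Int.mod i 3 != 0 && PySem.Int.mod i 3 != 1)) := by
  have hm : ∀ i : Int, PySem.Int.mod i 3 = i % 3 :=
    fun i => PySem.Int.mod_eq_emod_of_pos (by norm_num)
  simp only [hm]
  induction nlist generalizing a b c with
  | nil => simp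
  | cons x xs ih =>
    by_cases h0 : (3 : Int) ∣ x
    · have h0' : x % 3 = 0 := Int.emod_eq_zero_of_dvd h0
      simp only [List.foldl_cons, List.filter_cons, h0', ih]
      simp
    · have h0' : x % 3 ≠ 0 := fun h => h0 (Int.dvd_of_emod_eq_zero h)
      by_cases h1 : x % 3 = 1
      · simp only [List.foldl_cons, List.filter_cons, ih]
        simp [h1]
      · simp only [List.foldl_cons, List.filter_cons, ih]
        simp [h0', h1]

-- ===== VERDICT (by name: the statement is the Claim_ definition above) =====
theorem divide3_spec : Claim_equal_divide3 := by
  intro nlist _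
  show divide3 nlist = divide3_alt nlist
  simpa [divide3, divide3_alt] using divide3_foldl_inv nlist [] [] []
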